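-- pv_equiv track=rewrite | github.com/orsenthil/sourashtra-dictionary | tools/src/split_terms.py | split_field_by_separators
-- ===== SOURCE A (Python) =====
-- def split_field_by_separators(field):
--     """
--     Split a field by '/' or ',' separators, handling quoted content properly.
--
--     Args:
--         field (str): Field content that may contain composite terms
--
--     Returns:
--         list: List of individual terms
--     """
--     if not field or field.strip() == '':
--         return ['']
--
--     # Handle cases where the entire field is quoted
--     field = field.strip()
--     if field.startswith('"') and field.endswith('"'):
--         # Remove outer quotes and split the inner content
--         inner_content = field[1:-1]
--         # Split by comma first, then by forward slash
--         parts = []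
--         for part in inner_content.split(','):
--             part = part.strip()
--             if '/' in part:
--                 parts.extend([p.strip() for p in part.split('/')])
--             else:
--                 parts.append(part)
--         return parts
--     else:
--         # Split by forward slash, then by comma
--         parts = []
--         for part in field.split('/'):
--             part = part.strip()
--             if ',' in part:
--                 parts.extend([p.strip() for p in part.split(',')])
--             else:
--                 parts.append(part)
--         return parts
-- ===== SOURCE B (Python) =====
-- def split_field_by_separators(field):
--     """Split a field by '/' or ',' separators, handling quoted content properly."""
--     if not field or field.strip() == '':
--         return ['']
--     s = field.strip()
--     if s.startswith('"') and s.endswith('"'):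
--         s = s[1:-1]
--     # single left-to-right scan: cut at every '/' or ',' and strip each token
--     tokens, cur = [], []
--     for ch in s:
--         if ch == '/' or ch == ',':
--             tokens.append(''.join(cur).strip())
--             cur = []
--         else:
--             cur.append(ch)
--     tokens.append(''.join(cur).strip())
--     return tokens
-- ===== Notes on version B (the rewrite author's own statement) =====
-- stated objective: simpler
-- what changed: A's two mirrored branches of nested split-then-conditional-resplit (split by one separator, then re-split each piece by the other) are collapsed into one single left-to-right character scan that cuts at either separator and strips each token once.
import Mathlib
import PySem

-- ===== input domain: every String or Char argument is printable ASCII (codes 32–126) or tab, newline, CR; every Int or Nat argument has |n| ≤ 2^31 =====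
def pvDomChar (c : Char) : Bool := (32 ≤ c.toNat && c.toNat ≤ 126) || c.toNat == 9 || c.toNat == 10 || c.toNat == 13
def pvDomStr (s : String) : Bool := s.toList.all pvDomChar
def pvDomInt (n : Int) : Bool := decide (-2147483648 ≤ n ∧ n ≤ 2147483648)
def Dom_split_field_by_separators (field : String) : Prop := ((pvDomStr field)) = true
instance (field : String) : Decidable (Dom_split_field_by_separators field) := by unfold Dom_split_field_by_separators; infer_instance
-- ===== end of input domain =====

-- B replaces A's two mirrored nested split-then-resplit branches by one single
-- left-to-right scan cutting at every '/' or ','; objective: simpler.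

-- ===== PORT A =====
def split_field_by_separators (field : String) : List String :=
  if field.toList = [] ∨ PySem.Chars.strip field.toList = [] then [""]
  else
    let f := PySem.Chars.strip field.toList
    if PySem.Chars.startswith f ['"'] && PySem.Chars.endswith f ['"'] then
      let inner := PySem.List.slice f (some 1) (some (-1))
      let parts := (PySem.Chars.splitOn inner [',']).foldl
        (fun parts part =>
          let part := PySem.Chars.strip part
          if PySem.Chars.isIn ['/'] part then
            parts ++ (PySem.Chars.splitOn part ['/']).map PySem.Chars.strip
          else parts ++ [part]) []
      parts.map String.ofList
    else
      let parts := (PySem.Chars.splitOn f ['/']).foldl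
        (fun parts part =>
          let part := PySem.Chars.strip part
          if PySem.Chars.isIn [','] part then
            parts ++ (PySem.Chars.splitOn part [',']).map PySem.Chars.strip
          else parts ++ [part]) []
      parts.map String.ofList

-- ===== PORT B =====
def split_field_by_separators_alt (field : String) : List String :=
  if field.toList = [] ∨ PySem.Chars.strip field.toList = [] then [""]
  else
    let s := PySem.Chars.strip field.toList
    let content := if PySem.Chars.startswith s ['"'] && PySem.Chars.endswith s ['"']
                   then PySem.List.slice s (some 1) (some (-1)) else s
    let r := content.foldl
      (fun (st : List (List Char) × List Char) ch =>
        if ch = '/' ∨ ch = ',' then (st.1 ++ [PySem.Chars.strip st.2], ([] : List Char))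
        else (st.1, st.2 ++ [ch])) ([], [])
    (r.1 ++ [PySem.Chars.strip r.2]).map String.ofList

-- ===== PRECONDITION & SPEC =====
def Spec_split_field_by_separators (field : String) (out : List String) : Prop := out = split_field_by_separators_alt field
instance (field : String) (out : List String) : Decidable (Spec_split_field_by_separators field out) := by unfold Spec_split_field_by_separators; infer_instance

-- ===== CLAIM (what is proved, stated in full; the proofs are below) =====
def Claim_equal_split_field_by_separators : Prop := ∀ (field : String), Dom_split_field_by_separators field → Spec_split_field_by_separators field (split_field_by_separators field)

-- ===== LEMMAS AND PROOFS =====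

-- generic splitter on a character predicate (proof-side model of str.split on a 1-char sep)
def splitP (p : Char → Bool) : List Char → List (List Char)
  | [] => [[]]
  | a :: s =>
    if p a then [] :: splitP p s
    else match splitP p s with
      | [] => [[a]]
      | t :: ts => (a :: t) :: ts

def orP : Char → Bool := fun x => x == '/' || x == ','

lemma splitP_ne_nil (p : Char → Bool) (l : List Char) : splitP p l ≠ [] := by
  cases l with
  | nil => simp [splitP]
  | cons a s =>
    simp only [splitP]
    split
    · simp
    · split <;> simp

lemma go_eq (c : Char) (fuel : Nat) : ∀ (l cur acc : _), l.length ≤ fuel →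
    PySem.Chars.splitOn.go [c] fuel l cur acc =
      acc.reverse ++ (match splitP (fun x => x == c) l with
        | [] => [cur.reverse]
        | t :: ts => (cur.reverse ++ t) :: ts) := by
  induction fuel with
  | zero =>
    intro l cur acc hle
    have : l = [] := by cases l <;> simp_all
    subst this
    simp [PySem.Chars.splitOn.go, splitP]
  | succ fuel ih =>
    intro l cur acc hle
    cases l with
    | nil => simp [PySem.Chars.splitOn.go, splitP]
    | cons h t =>
      by_cases hc : c = h
      · subst hc
        have hpre : List.isPrefixOf [c] (c :: t) = true := by
          simp [List.isPrefixOf]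
        rw [show PySem.Chars.splitOn.go [c] (fuel+1) (c :: t) cur acc
              = PySem.Chars.splitOn.go [c] fuel (List.drop [c].length (c :: t)) [] (cur.reverse :: acc) by
            simp [PySem.Chars.splitOn.go, hpre]]
        simp only [List.length_cons, List.length_nil, Nat.zero_add, List.drop_succ_cons, List.drop_zero]
        rw [ih t [] (cur.reverse :: acc) (by simpa using hle)]
        rcases hu : splitP (fun x => x == c) t with _ | ⟨u, us⟩
        · exact absurd hu (splitP_ne_nil _ _)
        · simp [splitP, hu]
      · have hpre : List.isPrefixOf [c] (h :: t) = false := by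
          simp [List.isPrefixOf, hc]
        rw [show PySem.Chars.splitOn.go [c] (fuel+1) (h :: t) cur acc
              = PySem.Chars.splitOn.go [c] fuel t (h :: cur) acc by
            simp [PySem.Chars.splitOn.go, hpre]]
        rw [ih t (h :: cur) acc (by simpa using hle)]
        rcases hu : splitP (fun x => x == c) t with _ | ⟨u, us⟩
        · exact absurd hu (splitP_ne_nil _ _)
        · have : (h == c) = false := by simp [Ne.symm hc]
          simp [splitP, hu, this]

lemma splitOn_eq (l : List Char) (c : Char) :
    PySem.Chars.splitOn l [c] = splitP (fun x => x == c) l := by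
  rw [show PySem.Chars.splitOn l [c] = PySem.Chars.splitOn.go [c] (l.length + 1) l [] [] from rfl]
  rw [go_eq c (l.length + 1) l [] [] (by omega)]
  rcases hu : splitP (fun x => x == c) l with _ | ⟨u, us⟩
  · exact absurd hu (splitP_ne_nil _ _)
  · simp

-- whitespace / strip facts
lemma lstrip_cons_ws {h : Char} {t : List Char} (hw : PySem.Chars.isspace h = true) :
    PySem.Chars.lstrip (h :: t) = PySem.Chars.lstrip t := by
  simp [PySem.Chars.lstrip, hw]

lemma strip_cons_ws {h : Char} {t : List Char} (hw : PySem.Chars.isspace h = true) :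
    PySem.Chars.strip (h :: t) = PySem.Chars.strip t := by
  simp [PySem.Chars.strip, lstrip_cons_ws hw]

lemma rstrip_snoc_ws {w : Char} {u : List Char} (hw : PySem.Chars.isspace w = true) :
    PySem.Chars.rstrip (u ++ [w]) = PySem.Chars.rstrip u := by
  simp [PySem.Chars.rstrip, hw]

lemma rstrip_snoc_not_ws {w : Char} {u : List Char} (hw : PySem.Chars.isspace w = false) :
    PySem.Chars.rstrip (u ++ [w]) = u ++ [w] := by
  simp [PySem.Chars.rstrip, hw]

lemma strip_snoc_ws {w : Char} {t : List Char} (hw : PySem.Chars.isspace w = true) :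
    PySem.Chars.strip (t ++ [w]) = PySem.Chars.strip t := by
  unfold PySem.Chars.strip
  unfold PySem.Chars.lstrip
  rw [List.dropWhile_append]
  by_cases he : (List.dropWhile PySem.Chars.isspace t).isEmpty
  · have hte : List.dropWhile PySem.Chars.isspace t = [] := List.isEmpty_iff.mp he
    simp [hte, hw, PySem.Chars.rstrip]
  · simp only [he, if_neg, Bool.false_eq_true, not_false_iff]
    exact rstrip_snoc_ws hw

lemma dropWhile_head_false {α : Type} (p : α → Bool) (l : List α) :
    ∀ a ∈ (l.dropWhile p).head?, p a = false := by
  induction l with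
  | nil => simp
  | cons a t ih =>
    by_cases ha : p a
    · rw [List.dropWhile_cons_of_pos ha]
      exact ih
    · simp only [Bool.not_eq_true] at ha
      rw [List.dropWhile_cons_of_neg (by simp [ha])]
      intro b hb
      simp only [List.head?_cons, Option.mem_def, Option.some.injEq] at hb
      subst hb
      exact ha

lemma dropWhile_getElem_zero_false {α : Type} (p : α → Bool) (l : List α)
    (hl : 0 < (l.dropWhile p).length) : p ((l.dropWhile p)[0]) = false := by
  apply dropWhile_head_false p l
  rw [List.head?_eq_getElem?, List.getElem?_eq_getElem hl]
  rfl

lemma lstrip_idem (s : List Char) :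
    PySem.Chars.lstrip (PySem.Chars.lstrip s) = PySem.Chars.lstrip s := by
  unfold PySem.Chars.lstrip
  rw [List.dropWhile_eq_self_iff]
  intro hl
  simp [dropWhile_getElem_zero_false _ _ hl]

lemma rstrip_prefix (s : List Char) : PySem.Chars.rstrip s <+: s := by
  unfold PySem.Chars.rstrip
  have h : List.dropWhile PySem.Chars.isspace s.reverse <:+ s.reverse :=
    List.dropWhile_suffix _
  have h2 := List.reverse_prefix.mpr h
  simpa using h2

lemma lstrip_eq_self_of_head {y : List Char}
    (hy : PySem.Chars.lstrip y = y) :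
    PySem.Chars.lstrip (PySem.Chars.rstrip y) = PySem.Chars.rstrip y := by
  rcases hry : PySem.Chars.rstrip y with _ | ⟨h, z⟩
  · simp [PySem.Chars.lstrip]
  · have hpre : PySem.Chars.rstrip y <+: y := rstrip_prefix y
    rw [hry] at hpre
    rcases hpre with ⟨rest, hrest⟩
    have hyhead : ∃ y', y = h :: y' := ⟨z ++ rest, by simpa using hrest.symm⟩
    rcases hyhead with ⟨y', rfl⟩
    have hnw : PySem.Chars.isspace h = false := by
      by_contra hw
      simp only [Bool.not_eq_false] at hw
      rw [lstrip_cons_ws hw] at hy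
      have := congrArg List.length hy
      have hle := List.length_dropWhile_le (p := PySem.Chars.isspace) (l := y')
      simp [PySem.Chars.lstrip] at this hle
      omega
    simp [PySem.Chars.lstrip, hnw]

lemma rstrip_idem (s : List Char) :
    PySem.Chars.rstrip (PySem.Chars.rstrip s) = PySem.Chars.rstrip s := by
  unfold PySem.Chars.rstrip
  rw [List.reverse_reverse, List.dropWhile_eq_self_iff.mpr]
  intro hl
  simp [dropWhile_getElem_zero_false _ _ hl]

lemma strip_idem (s : List Char) :
    PySem.Chars.strip (PySem.Chars.strip s) = PySem.Chars.strip s := by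
  unfold PySem.Chars.strip
  rw [lstrip_eq_self_of_head (lstrip_idem s), rstrip_idem]

-- splitP interacts with strip
lemma map_strip_lstrip {c : Char} (hc : PySem.Chars.isspace c = false) (l : List Char) :
    (splitP (fun x => x == c) (PySem.Chars.lstrip l)).map PySem.Chars.strip
      = (splitP (fun x => x == c) l).map PySem.Chars.strip := by
  induction l with
  | nil => rfl
  | cons h t ih =>
    by_cases hw : PySem.Chars.isspace h = true
    · have hhc : (h == c) = false := by
        by_contra hb
        simp only [Bool.not_eq_false, beq_iff_eq] at hb
        subst hb; rw [hw] at hc; exact Bool.true_eq_false ▸ (by simp at hc)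
      rw [lstrip_cons_ws hw, ih]
      rcases hu : splitP (fun x => x == c) t with _ | ⟨u, us⟩
      · exact absurd hu (splitP_ne_nil _ _)
      · simp [splitP, hhc, hu, strip_cons_ws hw]
    · have : PySem.Chars.lstrip (h :: t) = h :: t := by
        simp only [Bool.not_eq_true] at hw
        simp [PySem.Chars.lstrip, hw]
      rw [this]

def snocLast (x : Char) : List (List Char) → List (List Char)
  | [] => [[x]]
  | [t] => [t ++ [x]]
  | t :: ts => t :: snocLast x ts

lemma splitP_snoc (p : Char → Bool) (x : Char) : ∀ l : List Char,
    splitP p (l ++ [x]) = if p x then splitP p l ++ [[]] else snocLast x (splitP p l) := by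
  intro l
  induction l with
  | nil =>
    by_cases hx : p x <;> simp [splitP, snocLast, hx]
  | cons a l ih =>
    by_cases ha : p a
    · by_cases hx : p x <;>
        · rcases hu : splitP p l with _ | ⟨u, us⟩
          · exact absurd hu (splitP_ne_nil _ _)
          · simp [splitP, ha, hx, ih, hu, snocLast]
    · rcases hu : splitP p l with _ | ⟨u, us⟩
      · exact absurd hu (splitP_ne_nil _ _)
      · by_cases hx : p x
        · simp [splitP, ha, hx, ih, hu]
        · cases us with
          | nil => simp [splitP, ha, hx, ih, hu, snocLast]
          | cons v vs => simp [splitP, ha, hx, ih, hu, snocLast]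

lemma map_strip_snocLast {w : Char} (hw : PySem.Chars.isspace w = true) :
    ∀ (ss : List (List Char)), ss ≠ [] →
    (snocLast w ss).map PySem.Chars.strip = ss.map PySem.Chars.strip := by
  intro ss
  induction ss with
  | nil => intro h; exact absurd rfl h
  | cons t ts ih =>
    intro _
    cases ts with
    | nil => simp [snocLast, strip_snoc_ws hw]
    | cons v vs => simp [snocLast, ih (by simp)]

lemma map_strip_rstrip {c : Char} (hc : PySem.Chars.isspace c = false) (l : List Char) :
    (splitP (fun x => x == c) (PySem.Chars.rstrip l)).map PySem.Chars.strip
      = (splitP (fun x => x == c) l).map PySem.Chars.strip := by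
  induction l using List.reverseRecOn with
  | nil => rfl
  | append_singleton l x ih =>
    by_cases hw : PySem.Chars.isspace x = true
    · have hxc : ((x == c) : Bool) = false := by
        by_contra hb
        simp only [Bool.not_eq_false, beq_iff_eq] at hb
        subst hb; rw [hw] at hc; simp at hc
      rw [rstrip_snoc_ws hw, ih, splitP_snoc]
      rw [if_neg (by simp [hxc])]
      exact (map_strip_snocLast hw _ (splitP_ne_nil _ _)).symm
    · simp only [Bool.not_eq_true] at hw
      rw [rstrip_snoc_not_ws hw]

lemma map_strip_strip {c : Char} (hc : PySem.Chars.isspace c = false) (l : List Char) :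
    (splitP (fun x => x == c) (PySem.Chars.strip l)).map PySem.Chars.strip
      = (splitP (fun x => x == c) l).map PySem.Chars.strip := by
  have hs : PySem.Chars.strip l = PySem.Chars.rstrip (PySem.Chars.lstrip l) := rfl
  rw [hs, map_strip_rstrip hc, map_strip_lstrip hc]

lemma splitP_singleton_of_not_mem {c : Char} {l : List Char} (h : c ∉ l) :
    splitP (fun x => x == c) l = [l] := by
  induction l with
  | nil => rfl
  | cons a t ih =>
    have hac : ((a == c) : Bool) = false := by
      simp only [beq_eq_false_iff_ne, ne_eq]
      intro hh; exact h (hh ▸ List.mem_cons_self)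
    rw [show splitP (fun x => x == c) (a :: t)
        = match splitP (fun x => x == c) t with
          | [] => [[a]]
          | t' :: ts => (a :: t') :: ts by simp [splitP, hac]]
    rw [ih (fun hm => h (List.mem_cons_of_mem _ hm))]

lemma infix_singleton_of_mem {c : Char} {l : List Char} (h : c ∈ l) : [c] <:+: l := by
  rcases List.append_of_mem h with ⟨s, t, rfl⟩
  exact ⟨s, t, by simp⟩

-- nested split = split on the union predicate
lemma flatMap_splitP (p q : Char → Bool) (hpq : ∀ x, p x = true → q x = false) :
    ∀ l : List Char, (splitP p l).flatMap (splitP q) = splitP (fun x => p x || q x) l := by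
  intro l
  induction l with
  | nil => simp [splitP]
  | cons h t ih =>
    by_cases hp : p h
    · simp [splitP, hp, ih, hpq h hp]
    · rcases hu : splitP p t with _ | ⟨u, us⟩
      · exact absurd hu (splitP_ne_nil _ _)
      · by_cases hq : q h
        · rw [show splitP (fun x => p x || q x) (h :: t) = [] :: splitP (fun x => p x || q x) t by
            simp [splitP, hp, hq]]
          rw [show splitP p (h :: t) = (h :: u) :: us by simp [splitP, hp, hu]]
          rw [← ih, hu]
          simp [splitP, hq]
        · rw [show splitP p (h :: t) = (h :: u) :: us by simp [splitP, hp, hu]]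
          rw [show splitP (fun x => p x || q x) (h :: t)
              = match splitP (fun x => p x || q x) t with
                | [] => [[h]]
                | t' :: ts => (h :: t') :: ts by simp [splitP, hp, hq]]
          rw [← ih, hu]
          rcases hv : splitP q u with _ | ⟨v, vs⟩
          · exact absurd hv (splitP_ne_nil _ _)
          · simp [splitP, hq, hv, List.flatMap_cons]

lemma splitP_or_comm (a b : Char) (l : List Char) :
    splitP (fun x => x == a || x == b) l = splitP (fun x => x == b || x == a) l := by
  have : (fun x : Char => x == a || x == b) = (fun x => x == b || x == a) := by
    funext x; exact Bool.or_comm _ _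
  rw [this]

-- A's branch body: split by c₁, strip each piece, re-split pieces containing c₂
lemma sideA (c₁ c₂ : Char) (hne : c₁ ≠ c₂)
    (h₂ : PySem.Chars.isspace c₂ = false) (l : List Char) :
    ((PySem.Chars.splitOn l [c₁]).foldl
      (fun parts part =>
        let part := PySem.Chars.strip part
        if PySem.Chars.isIn [c₂] part then
          parts ++ (PySem.Chars.splitOn part [c₂]).map PySem.Chars.strip
        else parts ++ [part]) [])
    = (splitP (fun x => x == c₁ || x == c₂) l).map PySem.Chars.strip := by
  have hstep : (fun (parts : List (List Char)) part =>
        let part := PySem.Chars.strip part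
        if PySem.Chars.isIn [c₂] part then
          parts ++ (PySem.Chars.splitOn part [c₂]).map PySem.Chars.strip
        else parts ++ [part])
      = fun parts part => parts ++ (splitP (fun x => x == c₂) (PySem.Chars.strip part)).map PySem.Chars.strip := by
    funext parts part
    simp only []
    by_cases hin : PySem.Chars.isIn [c₂] (PySem.Chars.strip part) = true
    · rw [if_pos hin, splitOn_eq]
    · rw [if_neg hin]
      have hnm : c₂ ∉ PySem.Chars.strip part := by
        intro hm
        exact hin (by
          rw [show PySem.Chars.isIn [c₂] (PySem.Chars.strip part) = true ↔ [c₂] <:+: PySem.Chars.strip part from PySem.Chars.isIn_iff_infix _ _]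
          exact infix_singleton_of_mem hm)
      rw [splitP_singleton_of_not_mem hnm]
      simp [strip_idem]
  rw [hstep, PySem.List.foldl_append_eq_flatMap, List.nil_append, splitOn_eq]
  have hpieces : ∀ t : List Char,
      (splitP (fun x => x == c₂) (PySem.Chars.strip t)).map PySem.Chars.strip
        = (splitP (fun x => x == c₂) t).map PySem.Chars.strip := fun t => map_strip_strip h₂ t
  calc (splitP (fun x => x == c₁) l).flatMap
          (fun part => (splitP (fun x => x == c₂) (PySem.Chars.strip part)).map PySem.Chars.strip)
      = (splitP (fun x => x == c₁) l).flatMap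
          (fun part => (splitP (fun x => x == c₂) part).map PySem.Chars.strip) := by
        exact List.flatMap_congr (fun t _ => hpieces t)
    _ = ((splitP (fun x => x == c₁) l).flatMap (splitP (fun x => x == c₂))).map PySem.Chars.strip := by
        rw [List.map_flatMap]
    _ = (splitP (fun x => x == c₁ || x == c₂) l).map PySem.Chars.strip := by
        rw [flatMap_splitP _ _ (fun x hx => by
          simp only [beq_iff_eq] at hx
          subst hx
          simp [beq_eq_false_iff_ne, hne])]

-- B's scan loop
lemma scan_eq : ∀ (l : List Char) (ts : List (List Char)) (cur : List Char),
    (let r := l.foldl (fun (st : List (List Char) × List Char) ch =>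
        if ch = '/' ∨ ch = ',' then (st.1 ++ [PySem.Chars.strip st.2], ([] : List Char))
        else (st.1, st.2 ++ [ch])) (ts, cur);
     r.1 ++ [PySem.Chars.strip r.2])
    = ts ++ (match splitP orP l with
       | [] => [PySem.Chars.strip cur]
       | u :: us => PySem.Chars.strip (cur ++ u) :: us.map PySem.Chars.strip) := by
  intro l
  induction l with
  | nil => intro ts cur; simp [splitP]
  | cons ch t ih =>
    intro ts cur
    by_cases hch : ch = '/' ∨ ch = ','
    · have horP : orP ch = true := by
        rcases hch with h | h <;> simp [orP, h]
      rw [show (ch :: t).foldl (fun (st : List (List Char) × List Char) ch =>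
            if ch = '/' ∨ ch = ',' then (st.1 ++ [PySem.Chars.strip st.2], ([] : List Char))
            else (st.1, st.2 ++ [ch])) (ts, cur)
          = t.foldl (fun (st : List (List Char) × List Char) ch =>
            if ch = '/' ∨ ch = ',' then (st.1 ++ [PySem.Chars.strip st.2], ([] : List Char))
            else (st.1, st.2 ++ [ch])) (ts ++ [PySem.Chars.strip cur], []) by
          simp [List.foldl_cons, hch]]
      rw [ih]
      rcases hu : splitP orP t with _ | ⟨u, us⟩
      · exact absurd hu (splitP_ne_nil _ _)
      · rw [show splitP orP (ch :: t) = [] :: splitP orP t by simp [splitP, horP]]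
        simp [hu]
    · have h1 : ch ≠ '/' := fun h => hch (Or.inl h)
      have h2 : ch ≠ ',' := fun h => hch (Or.inr h)
      have horP : orP ch = false := by simp [orP, h1, h2]
      rw [show (ch :: t).foldl (fun (st : List (List Char) × List Char) ch =>
            if ch = '/' ∨ ch = ',' then (st.1 ++ [PySem.Chars.strip st.2], ([] : List Char))
            else (st.1, st.2 ++ [ch])) (ts, cur)
          = t.foldl (fun (st : List (List Char) × List Char) ch =>
            if ch = '/' ∨ ch = ',' then (st.1 ++ [PySem.Chars.strip st.2], ([] : List Char))
            else (st.1, st.2 ++ [ch])) (ts, cur ++ [ch]) by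
          simp [List.foldl_cons, hch]]
      rw [ih]
      rcases hu : splitP orP t with _ | ⟨u, us⟩
      · exact absurd hu (splitP_ne_nil _ _)
      · rw [show splitP orP (ch :: t) = (ch :: u) :: us by simp [splitP, orP, hu, h1, h2]]
        simp

lemma scan_result (l : List Char) :
    (let r := l.foldl (fun (st : List (List Char) × List Char) ch =>
        if ch = '/' ∨ ch = ',' then (st.1 ++ [PySem.Chars.strip st.2], ([] : List Char))
        else (st.1, st.2 ++ [ch])) ([], []);
     r.1 ++ [PySem.Chars.strip r.2])
    = (splitP orP l).map PySem.Chars.strip := by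
  rw [scan_eq l [] []]
  rcases hu : splitP orP l with _ | ⟨u, us⟩
  · exact absurd hu (splitP_ne_nil _ _)
  · simp

theorem main_eq (field : String) :
    split_field_by_separators field = split_field_by_separators_alt field := by
  unfold split_field_by_separators split_field_by_separators_alt
  by_cases h0 : field.toList = [] ∨ PySem.Chars.strip field.toList = []
  · rw [if_pos h0, if_pos h0]
  · rw [if_neg h0, if_neg h0]
    simp only []
    by_cases hq : (PySem.Chars.startswith (PySem.Chars.strip field.toList) ['"'] &&
                   PySem.Chars.endswith (PySem.Chars.strip field.toList) ['"']) = true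
    · rw [if_pos hq, if_pos hq]
      congr 1
      rw [sideA ',' '/' (by decide) (by decide)]
      rw [splitP_or_comm]
      rw [scan_result]
      rfl
    · rw [if_neg hq, if_neg hq]
      congr 1
      rw [sideA '/' ',' (by decide) (by decide)]
      rw [scan_result]
      rfl

-- ===== VERDICT (by name: the statement is the Claim_ definition above) =====
theorem split_field_by_separators_spec : Claim_equal_split_field_by_separators := by
  intro field _
  unfold Spec_split_field_by_separators
  exact main_eq field
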